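-- pv_equiv track=rewrite | github.com/CLEVER1337/acmp_agent | solutions/184.py | date_to_minutes
-- ===== SOURCE A (Python) =====
-- def date_to_minutes(month, day, hour, minute):
--     days_in_month = [31, 28, 31, 30, 31, 30, 31, 31, 30, 31, 30, 31]
--     total_minutes = 0
--
--     for m in range(1, month):
--         total_minutes += days_in_month[m-1] * 24 * 60
--
--     total_minutes += (day - 1) * 24 * 60
--     total_minutes += hour * 60
--     total_minutes += minute
--
--     return total_minutes
-- ===== SOURCE B (Python) =====
-- DAYS_IN_MONTH = [31, 28, 31, 30, 31, 30, 31, 31, 30, 31, 30, 31]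
--
-- def _month_start(m):
--     """Minutes elapsed from the start of the year to the start of month m."""
--     if m <= 1:
--         return 0
--     return _month_start(m - 1) + DAYS_IN_MONTH[m - 2] * 1440
--
-- def date_to_minutes(month, day, hour, minute):
--     return _month_start(month) + (day - 1) * 1440 + hour * 60 + minute
-- ===== Notes on version B (the rewrite author's own statement) =====
-- stated objective: alternative
-- what changed: Replaces A's range loop with a running accumulator by a recursive decomposition: a named helper computes the minutes elapsed at each month's start by structural recursion, and the top-level function is one arithmetic expression over it.
import Mathlib
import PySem

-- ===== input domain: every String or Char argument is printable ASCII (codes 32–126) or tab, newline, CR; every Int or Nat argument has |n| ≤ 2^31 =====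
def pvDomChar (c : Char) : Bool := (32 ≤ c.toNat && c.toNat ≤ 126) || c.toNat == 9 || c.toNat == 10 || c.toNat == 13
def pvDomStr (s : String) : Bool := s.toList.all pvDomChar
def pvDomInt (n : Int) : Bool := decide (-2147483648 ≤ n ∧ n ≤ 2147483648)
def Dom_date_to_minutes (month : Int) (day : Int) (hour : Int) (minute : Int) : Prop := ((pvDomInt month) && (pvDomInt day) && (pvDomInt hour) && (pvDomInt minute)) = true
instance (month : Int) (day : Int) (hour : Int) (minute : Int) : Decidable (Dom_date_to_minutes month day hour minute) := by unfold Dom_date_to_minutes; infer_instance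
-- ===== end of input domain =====

-- B replaces A's range loop and running accumulator by a recursive decomposition: a helper
-- computes the minutes at each month's start by structural recursion (objective: alternative).

-- ===== PORT A =====
def date_to_minutes (month : Int) (day : Int) (hour : Int) (minute : Int) : Int :=
  let days_in_month : List Int := [31, 28, 31, 30, 31, 30, 31, 31, 30, 31, 30, 31]
  let total_minutes : Int := 0
  -- for m in range(1, month): total_minutes += days_in_month[m-1] * 24 * 60
  -- (pyGet? returns none where Python raises IndexError; that is outside Pre_, .getD 0 picks a value there)
  let total_minutes := (PySem.List.pyRange 1 month 1).foldl
      (fun acc m => acc + ((PySem.List.pyGet? days_in_month (m - 1)).getD 0) * 24 * 60) total_minutes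
  let total_minutes := total_minutes + (day - 1) * 24 * 60
  let total_minutes := total_minutes + hour * 60
  let total_minutes := total_minutes + minute
  total_minutes

-- ===== PORT B =====
def DAYS_IN_MONTH : List Int := [31, 28, 31, 30, 31, 30, 31, 31, 30, 31, 30, 31]

-- minutes elapsed from the start of the year to the start of month m
-- (pyGet? returns none where Python raises IndexError; that is outside Pre_, .getD 0 picks a value there)
def monthStart (m : Int) : Int :=
  if m ≤ 1 then 0
  else monthStart (m - 1) + ((PySem.List.pyGet? DAYS_IN_MONTH (m - 2)).getD 0) * 1440
termination_by (m - 1).toNat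
decreasing_by simp at *; omega

def date_to_minutes_alt (month : Int) (day : Int) (hour : Int) (minute : Int) : Int :=
  monthStart month + (day - 1) * 1440 + hour * 60 + minute

-- ===== PRECONDITION & SPEC =====
-- Pre_ excludes only month >= 14, where both A's list indexing and B's table indexing raise IndexError.
def Pre_date_to_minutes (month : Int) (day : Int) (hour : Int) (minute : Int) : Prop := month ≤ 13
instance (month : Int) (day : Int) (hour : Int) (minute : Int) : Decidable (Pre_date_to_minutes month day hour minute) := by unfold Pre_date_to_minutes; infer_instance
def pvWitness_date_to_minutes : Int × Int × Int × Int := (3, 5, 7, 30)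
def Spec_date_to_minutes (month : Int) (day : Int) (hour : Int) (minute : Int) (out : Int) : Prop := out = date_to_minutes_alt month day hour minute
instance (month : Int) (day : Int) (hour : Int) (minute : Int) (out : Int) : Decidable (Spec_date_to_minutes month day hour minute out) := by unfold Spec_date_to_minutes; infer_instance

-- ===== CLAIM (what is proved, stated in full; the proofs are below) =====
def Claim_equal_date_to_minutes : Prop := ∀ (month : Int) (day : Int) (hour : Int) (minute : Int), Dom_date_to_minutes month day hour minute → Pre_date_to_minutes month day hour minute → Spec_date_to_minutes month day hour minute (date_to_minutes month day hour minute)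

-- ===== LEMMAS AND PROOFS =====
-- A's month loop, given a name so it can be evaluated case by case
def sumA (month : Int) : Int :=
  (PySem.List.pyRange 1 month 1).foldl
    (fun acc m => acc + ((PySem.List.pyGet? ([31, 28, 31, 30, 31, 30, 31, 31, 30, 31, 30, 31] : List Int) (m - 1)).getD 0) * 24 * 60) 0

theorem sumA_eq_monthStart_low (month : Int) (h : month ≤ 1) : sumA month = monthStart month := by
  have he : PySem.List.pyRange 1 month 1 = [] := by
    simp [PySem.List.pyRange_one]
    omega
  rw [sumA, he, monthStart]
  simp [h]

theorem sumA_eq_monthStart (month : Int) (h : month ≤ 13) : sumA month = monthStart month := by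
  by_cases h1 : month ≤ 1
  · exact sumA_eq_monthStart_low month h1
  · have h2 : (2 : Int) ≤ month := by omega
    interval_cases month <;>
      simp [monthStart, PySem.List.pyGet?, PySem.List.pyIdx?, DAYS_IN_MONTH] <;> decide

-- ===== VERDICT (by name: the statement is the Claim_ definition above) =====
theorem date_to_minutes_spec : Claim_equal_date_to_minutes := by
  intro month day hour minute _ hpre
  show sumA month + (day - 1) * 24 * 60 + hour * 60 + minute
      = monthStart month + (day - 1) * 1440 + hour * 60 + minute
  rw [sumA_eq_monthStart month hpre]
  ring
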